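-- pv_equiv track=rewrite | github.com/Donghunn-Lee/CodingTest | 백준/Silver/1541. 잃어버린 괄호/잃어버린 괄호.py | add_parenthesis
-- ===== SOURCE A (Python) =====
-- def add_parenthesis(eq):
--     result = ''
--     num = ''
--     opened = False  # 괄호가 열려 있는지를 체크.
--
--     for i in eq:
--         if i == '-':
--             if num:
--                 # 새 연산자를 만날 때마다 이전의 숫자를 결과 식에 넣어줌.
--                 # int 형 변환 후 다시 str 형 변환을 하는 이유는 eval에 식이 들어갔을 때
--                 # 00009 처럼 int 형인데 0이 먼저 오는 파이썬 코드는 에러가 발생하기 때문.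
--                 result += str(int(num))
--                 num = ''
--             if opened:
--                 result += ')-('
--             else:
--                 result += '-('
--                 opened = True
--
--         elif i == '+':
--             if num:
--                 result += str(int(''.join(map(str, num))))
--                 num = ''
--             result += i
--         else:
--             num += i
--
--     # 반복이 끝났을 때 남아있는 num을 넣어주고, 괄호가 열려있는 경우 닫아줌.
--     if num:
--         result += str(int(''.join(map(str, num))))
--     if opened:
--         result += ')'
--
--     return result
-- ===== SOURCE B (Python) =====
-- def add_parenthesis(eq):
--     def proc(group):
--         return '+'.join(str(int(t)) if t else '' for t in group.split('+'))
--     first, *rest = eq.split('-')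
--     return '-'.join([proc(first)] + ['(' + proc(g) + ')' for g in rest])
-- ===== Notes on version B (the rewrite author's own statement) =====
-- stated objective: simpler
-- what changed: Replaces A's per-character state machine (running num buffer plus opened flag) with a split/join decomposition: split the expression at minus signs, normalize each plus-separated token via str(int(t)) (empty tokens stay empty), wrap every group after the first in parentheses and join with the minus signs.
import Mathlib
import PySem

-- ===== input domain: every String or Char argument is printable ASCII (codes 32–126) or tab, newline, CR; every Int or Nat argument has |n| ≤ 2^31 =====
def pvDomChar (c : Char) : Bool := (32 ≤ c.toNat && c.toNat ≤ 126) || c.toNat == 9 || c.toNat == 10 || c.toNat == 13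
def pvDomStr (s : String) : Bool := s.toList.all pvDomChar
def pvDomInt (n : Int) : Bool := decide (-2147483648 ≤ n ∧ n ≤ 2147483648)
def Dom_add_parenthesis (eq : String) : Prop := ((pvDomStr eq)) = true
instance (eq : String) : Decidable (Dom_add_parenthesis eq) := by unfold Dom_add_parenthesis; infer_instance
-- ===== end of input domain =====

-- B replaces A's character state machine (running num buffer + opened flag) by a split/join
-- decomposition: split on '-', normalize each '+'-separated token, wrap later groups in parentheses.
-- Objective: simpler. Equivalence is about the return value only (neither mutates anything).

-- ===== PORT A =====

-- str(int(num)): Python raises ValueError when int() fails; those inputs are outside Pre_,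
-- there the port returns [].
def pvConv (n : List Char) : List Char :=
  match PySem.Int.ofChars? n with
  | some z => PySem.Int.toChars z
  | none => []

-- one loop iteration of A, state = (result, num, opened)
def pvStepA (st : List Char × List Char × Bool) (c : Char) : List Char × List Char × Bool :=
  let (result, num, opened) := st
  if c = '-' then
    let result := if num ≠ [] then result ++ pvConv num else result
    if opened then (result ++ (')' :: '-' :: '(' :: []), [], true)
    else (result ++ ('-' :: '(' :: []), [], true)
  else if c = '+' then
    let result := if num ≠ [] then result ++ pvConv num else result
    (result ++ [c], [], opened)
  else (result, num ++ [c], opened)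

def add_parenthesis (eq : String) : String :=
  String.ofList
    (let st := eq.toList.foldl pvStepA ([], [], false)
     let result := if st.2.1 ≠ [] then st.1 ++ pvConv st.2.1 else st.1
     if st.2.2 then result ++ [')'] else result)

-- ===== PORT B =====

-- eq.split(sep) as (first group, later groups)
def pvSplit1 (sep : Char) : List Char → List Char × List (List Char)
  | [] => ([], [])
  | x :: rest =>
    let (h, t) := pvSplit1 sep rest
    if x = sep then ([], h :: t) else (x :: h, t)

-- str(int(t)) if t else ''
def pvConvTok (t : List Char) : List Char := if t = [] then [] else pvConv t

-- '+'.join(str(int(t)) if t else '' for t in group.split('+'))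
def pvProcGroup (g : List Char) : List Char :=
  let (h, t) := pvSplit1 '+' g
  pvConvTok h ++ (t.map (fun u => '+' :: pvConvTok u)).flatten

def add_parenthesis_alt (eq : String) : String :=
  String.ofList (pvProcGroup (pvSplit1 '-' eq.toList).1 ++
    ((pvSplit1 '-' eq.toList).2.map (fun g => '-' :: '(' :: (pvProcGroup g ++ [')']))).flatten)

-- ===== PRECONDITION & SPEC =====

-- tokens of eq between '+'/'-' separators; used only to state Pre_
def pvTokens : List Char → List (List Char)
  | [] => [[]]
  | x :: rest =>
    let t := pvTokens rest
    if x = '-' ∨ x = '+' then [] :: t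
    else match t with
      | h :: ts => (x :: h) :: ts
      | [] => [[x]]

-- A raises ValueError when int() is applied to a nonempty run of non-operator characters that is
-- not an integer literal; Pre_ admits exactly the inputs where every such run parses.
def Pre_add_parenthesis (eq : String) : Prop :=
  ∀ t ∈ pvTokens eq.toList, t ≠ [] → (PySem.Int.ofChars? t).isSome = true
instance (eq : String) : Decidable (Pre_add_parenthesis eq) := by
  unfold Pre_add_parenthesis; infer_instance

def pvWitness_add_parenthesis : String := "055-30+007--8"

def Spec_add_parenthesis (eq : String) (out : String) : Prop := out = add_parenthesis_alt eq
instance (eq : String) (out : String) : Decidable (Spec_add_parenthesis eq out) := by unfold Spec_add_parenthesis; infer_instance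

-- ===== CLAIM (what is proved, stated in full; the proofs are below) =====
def Claim_equal_add_parenthesis : Prop := ∀ (eq : String), Dom_add_parenthesis eq → Pre_add_parenthesis eq → Spec_add_parenthesis eq (add_parenthesis eq)

-- ===== LEMMAS AND PROOFS =====

-- the group wrapper of B
def pvWrap (g : List Char) : List Char := '-' :: '(' :: (pvProcGroup g ++ [')'])

lemma pvSplit1_no_sep (sep : Char) (n : List Char) (h : ∀ c ∈ n, c ≠ sep) :
    pvSplit1 sep n = (n, []) := by
  induction n with
  | nil => rfl
  | cons x xs ih =>
    have hx : x ≠ sep := h x (List.mem_cons_self ..)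
    simp [pvSplit1, ih (fun c hc => h c (List.mem_cons_of_mem _ hc)), hx]

lemma pvSplit1_append_sep (sep : Char) (n g : List Char) (h : ∀ c ∈ n, c ≠ sep) :
    pvSplit1 sep (n ++ sep :: g) =
      (n, (pvSplit1 sep g).1 :: (pvSplit1 sep g).2) := by
  induction n with
  | nil => simp [pvSplit1]
  | cons x xs ih =>
    have hx : x ≠ sep := h x (List.mem_cons_self ..)
    simp [pvSplit1, ih (fun c hc => h c (List.mem_cons_of_mem _ hc)), hx]

lemma pvProcGroup_no_plus (n : List Char) (h : ∀ c ∈ n, c ≠ '+') :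
    pvProcGroup n = pvConvTok n := by
  simp [pvProcGroup, pvSplit1_no_sep '+' n h]

lemma pvProcGroup_plus (n g : List Char) (h : ∀ c ∈ n, c ≠ '+') :
    pvProcGroup (n ++ '+' :: g) = pvConvTok n ++ '+' :: pvProcGroup g := by
  simp [pvProcGroup, pvSplit1_append_sep '+' n g h]

-- main loop invariant: folding A's step over cs with pending digits n equals B's split/join
-- of (n ++ cs), with r prepended and a pending ')' when a parenthesis is open
lemma pvMain (cs : List Char) : ∀ (r n : List Char) (op : Bool), (∀ c ∈ n, c ≠ '+') →
    (let st := cs.foldl pvStepA (r, n, op)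
     let result := if st.2.1 ≠ [] then st.1 ++ pvConv st.2.1 else st.1
     if st.2.2 then result ++ [')'] else result) =
      r ++ pvProcGroup (n ++ (pvSplit1 '-' cs).1) ++ (if op then [')'] else []) ++
        ((pvSplit1 '-' cs).2.map pvWrap).flatten := by
  induction cs with
  | nil =>
    intro r n op h
    simp only [List.foldl, pvSplit1, List.append_nil, List.map_nil, List.flatten_nil]
    rw [pvProcGroup_no_plus n h]
    by_cases hn : n = [] <;> cases op <;>
      simp [hn, pvConvTok, List.append_assoc]
  | cons x xs ih =>
    intro r n op h
    by_cases hm : x = '-'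
    · subst hm
      simp only [List.foldl, pvStepA, if_true,
        show pvSplit1 '-' ('-' :: xs) = ([], (pvSplit1 '-' xs).1 :: (pvSplit1 '-' xs).2) by
          simp [pvSplit1]]
      cases op
      · simp only [Bool.false_eq_true, if_false]
        rw [ih ((if n ≠ [] then r ++ pvConv n else r) ++ ['-', '(']) [] true (by simp)]
        rw [List.append_nil n, pvProcGroup_no_plus n h]
        by_cases hn : n = [] <;>
          simp [hn, pvConvTok, pvWrap, List.append_assoc]
      · simp only [if_true]
        rw [ih ((if n ≠ [] then r ++ pvConv n else r) ++ [')', '-', '(']) [] true (by simp)]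
        rw [List.append_nil n, pvProcGroup_no_plus n h]
        by_cases hn : n = [] <;>
          simp [hn, pvConvTok, pvWrap, List.append_assoc]
    · by_cases hp : x = '+'
      · subst hp
        simp only [List.foldl, pvStepA, if_neg (by decide : ¬ ('+' : Char) = '-'), if_true,
          show pvSplit1 '-' ('+' :: xs) = ('+' :: (pvSplit1 '-' xs).1, (pvSplit1 '-' xs).2) by
            simp [pvSplit1]]
        rw [ih ((if n ≠ [] then r ++ pvConv n else r) ++ ['+']) [] op (by simp)]
        rw [show n ++ '+' :: (pvSplit1 '-' xs).1 = n ++ '+' :: ([] ++ (pvSplit1 '-' xs).1) by simp,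
            pvProcGroup_plus n ([] ++ (pvSplit1 '-' xs).1) h]
        by_cases hn : n = [] <;>
          simp [hn, pvConvTok, List.append_assoc]
      · have hnn : ∀ c ∈ n ++ [x], c ≠ '+' := by
          intro c hc
          rcases List.mem_append.mp hc with hc | hc
          · exact h c hc
          · simp at hc; subst hc; exact hp
        simp only [List.foldl, pvStepA, if_neg hm, if_neg hp,
          show pvSplit1 '-' (x :: xs) = (x :: (pvSplit1 '-' xs).1, (pvSplit1 '-' xs).2) by
            simp [pvSplit1, hm]]
        rw [ih r (n ++ [x]) op hnn]
        simp [List.append_assoc]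

-- ===== VERDICT (by name: the statement is the Claim_ definition above) =====
theorem add_parenthesis_spec : Claim_equal_add_parenthesis := by
  intro eq _ _
  unfold Spec_add_parenthesis add_parenthesis add_parenthesis_alt
  have := pvMain eq.toList [] [] false (by simp)
  simp only [List.nil_append, Bool.false_eq_true, if_false, List.append_nil] at this
  unfold pvWrap at this
  exact congrArg String.ofList this
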